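-- pv_equiv track=rewrite | github.com/Mariam-Badr-MB/MARY | numerical system.py | bin_oct
-- ===== SOURCE A (Python) =====
-- def bin_oct(number) :
--    octal_numberlist = [000 , 1 , 10 , 11 , 100 , 101 , 110 ,111]
--    octal_number = []
--    while int(number) > 0 :
--        digit = int(number)%1000
--        octal_number.append(octal_numberlist.index(digit))
--        number = int(number)//1000
--    octal_number.reverse()
--    oct_num = "".join(map(str,octal_number))
--    return oct_num
-- ===== SOURCE B (Python) =====
-- def bin_oct(number):
--     # value-based conversion: read the decimal digits as binary, then format in base 8
--     n = int(number)
--     v = 0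
--     p = 1
--     while n > 0:
--         v += (n % 10) * p
--         n //= 10
--         p *= 2
--     digits = []
--     while v > 0:
--         digits.append(v % 8)
--         v //= 8
--     digits.reverse()
--     return "".join(map(str, digits))
-- ===== Notes on version B (the rewrite author's own statement) =====
-- stated objective: alternative
-- what changed: Replaces A's base-1000 grouping loop with its octal_numberlist.index table lookup by a whole-value conversion: one loop reads the decimal digits as a binary number, a second formats that value in base 8.
import Mathlib
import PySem

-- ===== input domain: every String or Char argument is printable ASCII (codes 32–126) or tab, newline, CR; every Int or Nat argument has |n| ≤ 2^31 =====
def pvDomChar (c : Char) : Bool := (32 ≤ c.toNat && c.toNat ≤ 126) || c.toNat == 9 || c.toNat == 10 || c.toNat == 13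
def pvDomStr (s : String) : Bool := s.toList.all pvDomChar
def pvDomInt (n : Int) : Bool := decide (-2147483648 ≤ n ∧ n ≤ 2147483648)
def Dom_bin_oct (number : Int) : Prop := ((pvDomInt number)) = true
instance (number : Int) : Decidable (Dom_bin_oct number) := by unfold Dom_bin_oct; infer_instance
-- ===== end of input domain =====

-- B converts through the whole value (decimal digits read as binary, then base-8 formatting)
-- instead of A's base-1000 grouping with a table lookup; equal return values on Pre_ (alternative, not claimed faster).

-- ===== PORT A =====
def pvOctalNumberlist : List Int := [0, 1, 10, 11, 100, 101, 110, 111]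

-- octal_numberlist.index digit; the `.getD 0` default is never reached inside Pre_
-- (outside Pre_ Python's .index raises ValueError, which Pre_ excludes)
def pvIdx (digit : Int) : Int := ((PySem.List.index? pvOctalNumberlist digit).getD 0 : Nat)

def pvBinOctLoop (number : Int) (octal_number : List Int) : List Int :=
  if 0 < number then
    pvBinOctLoop (PySem.Int.floordiv number 1000)
      (octal_number ++ [pvIdx (PySem.Int.mod number 1000)])
  else octal_number
termination_by number.toNat
decreasing_by
  rw [PySem.Int.floordiv_eq_ediv_of_pos (by norm_num)]
  omega

def bin_oct (number : Int) : String :=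
  let octal_number := (pvBinOctLoop number []).reverse
  PySem.Str.join "" (octal_number.map PySem.Int.toStr)

-- ===== PORT B =====
def pvBinVal (n v p : Int) : Int :=
  if 0 < n then
    pvBinVal (PySem.Int.floordiv n 10) (v + (PySem.Int.mod n 10) * p) (p * 2)
  else v
termination_by n.toNat
decreasing_by
  rw [PySem.Int.floordiv_eq_ediv_of_pos (by norm_num)]
  omega

def pvOctLoop (v : Int) (digits : List Int) : List Int :=
  if 0 < v then
    pvOctLoop (PySem.Int.floordiv v 8) (digits ++ [PySem.Int.mod v 8])
  else digits
termination_by v.toNat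
decreasing_by
  rw [PySem.Int.floordiv_eq_ediv_of_pos (by norm_num)]
  omega

def bin_oct_alt (number : Int) : String :=
  let v := pvBinVal number 0 1
  let digits := (pvOctLoop v []).reverse
  PySem.Str.join "" (digits.map PySem.Int.toStr)

-- ===== PRECONDITION & SPEC =====
-- Pre_ excludes exactly the inputs on which A raises ValueError (a positive number
-- containing a non-binary decimal digit, so that a base-1000 group is not in
-- octal_numberlist); A returns normally on every input satisfying Pre_.
def Pre_bin_oct (number : Int) : Prop :=
  number ≤ 0 ∨ ∀ k ∈ Finset.range 12, number / 10 ^ k % 10 ≤ 1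
instance (number : Int) : Decidable (Pre_bin_oct number) := by unfold Pre_bin_oct; infer_instance

def pvWitness_bin_oct : Int := 110101

def Spec_bin_oct (number : Int) (out : String) : Prop := out = bin_oct_alt number
instance (number : Int) (out : String) : Decidable (Spec_bin_oct number out) := by unfold Spec_bin_oct; infer_instance

-- ===== CLAIM (what is proved, stated in full; the proofs are below) =====
def Claim_equal_bin_oct : Prop := ∀ (number : Int), Dom_bin_oct number → Pre_bin_oct number → Spec_bin_oct number (bin_oct number)

-- ===== LEMMAS AND PROOFS =====

-- pure (accumulator-free) views of the three loops
def pvL (n : Int) : List Int :=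
  if 0 < n then pvIdx (n % 1000) :: pvL (n / 1000) else []
termination_by n.toNat
decreasing_by omega

def pvBV (n : Int) : Int :=
  if 0 < n then n % 10 + 2 * pvBV (n / 10) else 0
termination_by n.toNat
decreasing_by omega

def pvO (v : Int) : List Int :=
  if 0 < v then v % 8 :: pvO (v / 8) else []
termination_by v.toNat
decreasing_by omega

theorem pvBinOctLoop_eq (n : Int) (acc : List Int) :
    pvBinOctLoop n acc = acc ++ pvL n := by
  induction n, acc using pvBinOctLoop.induct with
  | case1 n acc h ih =>
      rw [pvBinOctLoop, if_pos h, ih]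
      conv_rhs => rw [pvL, if_pos h]
      rw [PySem.Int.floordiv_eq_ediv_of_pos (by norm_num : (0:Int) < 1000),
        PySem.Int.mod_eq_emod_of_pos (by norm_num : (0:Int) < 1000)]
      simp
  | case2 n acc h => rw [pvBinOctLoop, pvL, if_neg h, if_neg h]; simp

theorem pvBinVal_eq (n v p : Int) : pvBinVal n v p = v + p * pvBV n := by
  induction n, v, p using pvBinVal.induct with
  | case1 n v p h ih =>
      rw [pvBinVal, if_pos h, ih]
      conv_rhs => rw [pvBV, if_pos h]
      rw [PySem.Int.floordiv_eq_ediv_of_pos (by norm_num : (0:Int) < 10),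
        PySem.Int.mod_eq_emod_of_pos (by norm_num : (0:Int) < 10)]
      ring
  | case2 n v p h => rw [pvBinVal, pvBV, if_neg h, if_neg h]; ring

theorem pvOctLoop_eq (v : Int) (acc : List Int) :
    pvOctLoop v acc = acc ++ pvO v := by
  induction v, acc using pvOctLoop.induct with
  | case1 v acc h ih =>
      rw [pvOctLoop, if_pos h, ih]
      conv_rhs => rw [pvO, if_pos h]
      rw [PySem.Int.floordiv_eq_ediv_of_pos (by norm_num : (0:Int) < 8),
        PySem.Int.mod_eq_emod_of_pos (by norm_num : (0:Int) < 8)]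
      simp
  | case2 v acc h => rw [pvOctLoop, pvO, if_neg h, if_neg h]; simp

theorem pvBV_nonneg (n : Int) : 0 ≤ pvBV n := by
  induction n using pvBV.induct with
  | case1 n h ih => rw [pvBV, if_pos h]; have : 0 ≤ n % 10 := by omega
                    linarith
  | case2 n h => rw [pvBV, if_neg h]

theorem pvBV_pos (n : Int) (h : 0 < n) : 0 < pvBV n := by
  induction n using pvBV.induct with
  | case1 n h' ih =>
      rw [pvBV, if_pos h']
      rcases eq_or_lt_of_le (show (0:Int) ≤ n % 10 by omega) with he | hlt
      · have hq : 0 < n / 10 := by omega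
        have := ih hq
        linarith
      · have := pvBV_nonneg (n / 10)
        linarith
  | case2 n h' => omega

theorem pvBV_step (n : Int) (h : 0 ≤ n) : pvBV n = n % 10 + 2 * pvBV (n / 10) := by
  rcases eq_or_lt_of_le h with he | hp
  · have h0 : pvBV 0 = 0 := by rw [pvBV]; norm_num
    rw [← he]; norm_num [h0]
  · rw [pvBV, if_pos hp]

theorem pvBV_expand (n : Int) (h : 0 ≤ n) :
    pvBV n = n % 10 + 2 * (n / 10 % 10) + 4 * (n / 100 % 10) + 8 * pvBV (n / 1000) := by
  rw [pvBV_step n h, pvBV_step (n / 10) (by omega), pvBV_step (n / 10 / 10) (by omega)]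
  have h1 : n / 10 / 10 = n / 100 := by omega
  have h2 : n / 10 / 10 / 10 = n / 1000 := by omega
  rw [h2, h1]
  ring

theorem pvBV_split (n : Int) (h : 0 ≤ n) :
    pvBV n = pvBV (n % 1000) + 8 * pvBV (n / 1000) := by
  rw [pvBV_expand n h, pvBV_expand (n % 1000) (by omega)]
  have h0 : pvBV 0 = 0 := by rw [pvBV]; norm_num
  have e0 : n % 1000 % 10 = n % 10 := by omega
  have e1 : n % 1000 / 10 % 10 = n / 10 % 10 := by omega
  have e2 : n % 1000 / 100 % 10 = n / 100 % 10 := by omega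
  have e3 : n % 1000 / 1000 = 0 := by omega
  rw [e0, e1, e2, e3, h0]
  ring

theorem pvBV_small (r : Int) (h0' : 0 ≤ r) (hr : r < 1000) :
    pvBV r = r % 10 + 2 * (r / 10 % 10) + 4 * (r / 100 % 10) := by
  have h0 : pvBV 0 = 0 := by rw [pvBV]; norm_num
  have e3 : r / 1000 = 0 := by omega
  rw [pvBV_expand r h0', e3, h0]
  ring

theorem pvIdx_eq (r : Int) (h0 : 0 ≤ r) (hr : r < 1000)
    (d0 : r % 10 ≤ 1) (d1 : r / 10 % 10 ≤ 1) (d2 : r / 100 % 10 ≤ 1) :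
    pvIdx r = r % 10 + 2 * (r / 10 % 10) + 4 * (r / 100 % 10) := by
  have : r = 0 ∨ r = 1 ∨ r = 10 ∨ r = 11 ∨ r = 100 ∨ r = 101 ∨ r = 110 ∨ r = 111 := by
    omega
  rcases this with h | h | h | h | h | h | h | h <;> subst h <;> decide

theorem pvL_nil (n : Int) (h : n ≤ 0) : pvL n = [] := by
  rw [pvL, if_neg (by omega)]

theorem pvBV_zero' (n : Int) (h : n ≤ 0) : pvBV n = 0 := by
  rw [pvBV, if_neg (by omega)]

theorem pvO_nil (v : Int) (h : v ≤ 0) : pvO v = [] := by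
  rw [pvO, if_neg (by omega)]

theorem pvMainAux (N : Nat) : ∀ n : Int, n.toNat ≤ N → n < 10 ^ 12 →
    (∀ k ∈ Finset.range 12, n / 10 ^ k % 10 ≤ 1) → pvL n = pvO (pvBV n) := by
  induction N with
  | zero =>
      intro n hN _ _
      have h : n ≤ 0 := by omega
      rw [pvL_nil n h, pvBV_zero' n h, pvO_nil 0 le_rfl]
  | succ N ih =>
      intro n hN hlt hd
      rcases le_or_gt n 0 with h | h
      · rw [pvL_nil n h, pvBV_zero' n h, pvO_nil 0 le_rfl]
      · have hd0 : n % 10 ≤ 1 := by simpa using hd 0 (by norm_num)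
        have hd1 : n / 10 % 10 ≤ 1 := by
          have := hd 1 (by norm_num); norm_num at this; exact this
        have hd2 : n / 100 % 10 ≤ 1 := by
          have := hd 2 (by norm_num); norm_num at this; exact this
        have hr0 : 0 ≤ n % 1000 := by omega
        have hrlt : n % 1000 < 1000 := by omega
        have hsmall := pvBV_small (n % 1000) hr0 hrlt
        have hsplit := pvBV_split n (by omega)
        have er0 : n % 1000 % 10 = n % 10 := by omega
        have er1 : n % 1000 / 10 % 10 = n / 10 % 10 := by omega
        have er2 : n % 1000 / 100 % 10 = n / 100 % 10 := by omega
        have hbr : 0 ≤ pvBV (n % 1000) ∧ pvBV (n % 1000) < 8 := by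
          constructor <;> rw [hsmall] <;> omega
        have hbq := pvBV_nonneg (n / 1000)
        have hqd : ∀ k ∈ Finset.range 12, (n / 1000) / 10 ^ k % 10 ≤ 1 := by
          have a3 : n / 1000 % 10 ≤ 1 := by
            have := hd 3 (by norm_num); norm_num at this; exact this
          have a4 : n / 1000 / 10 % 10 ≤ 1 := by
            have h' := hd 4 (by norm_num); norm_num at h'
            have e : n / 1000 / 10 = n / 10000 := by omega
            rw [e]; exact h'
          have a5 : n / 1000 / 100 % 10 ≤ 1 := by
            have h' := hd 5 (by norm_num); norm_num at h'
            have e : n / 1000 / 100 = n / 100000 := by omega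
            rw [e]; exact h'
          have a6 : n / 1000 / 1000 % 10 ≤ 1 := by
            have h' := hd 6 (by norm_num); norm_num at h'
            have e : n / 1000 / 1000 = n / 1000000 := by omega
            rw [e]; exact h'
          have a7 : n / 1000 / 10000 % 10 ≤ 1 := by
            have h' := hd 7 (by norm_num); norm_num at h'
            have e : n / 1000 / 10000 = n / 10000000 := by omega
            rw [e]; exact h'
          have a8 : n / 1000 / 100000 % 10 ≤ 1 := by
            have h' := hd 8 (by norm_num); norm_num at h'
            have e : n / 1000 / 100000 = n / 100000000 := by omega
            rw [e]; exact h'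
          have a9 : n / 1000 / 1000000 % 10 ≤ 1 := by
            have h' := hd 9 (by norm_num); norm_num at h'
            have e : n / 1000 / 1000000 = n / 1000000000 := by omega
            rw [e]; exact h'
          have a10 : n / 1000 / 10000000 % 10 ≤ 1 := by
            have h' := hd 10 (by norm_num); norm_num at h'
            have e : n / 1000 / 10000000 = n / 10000000000 := by omega
            rw [e]; exact h'
          have a11 : n / 1000 / 100000000 % 10 ≤ 1 := by
            have h' := hd 11 (by norm_num); norm_num at h'
            have e : n / 1000 / 100000000 = n / 100000000000 := by omega
            rw [e]; exact h'
          have a12 : n / 1000 / 1000000000 = 0 := by omega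
          have a13 : n / 1000 / 10000000000 = 0 := by omega
          have a14 : n / 1000 / 100000000000 = 0 := by omega
          intro k hk
          simp only [Finset.mem_range] at hk
          interval_cases k <;> norm_num <;> omega
        have hihq := ih (n / 1000) (by omega) (by omega) hqd
        have hbpos : 0 < pvBV n := pvBV_pos n h
        rw [pvL, if_pos h, pvO, if_pos hbpos]
        have hm : pvBV n % 8 = pvBV (n % 1000) := by
          rw [hsplit, Int.add_mul_emod_self_left, Int.emod_eq_of_lt hbr.1 hbr.2]
        have hq : pvBV n / 8 = pvBV (n / 1000) := by
          rw [hsplit, Int.add_mul_ediv_left _ _ (by norm_num : (8:Int) ≠ 0),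
            Int.ediv_eq_zero_of_lt hbr.1 hbr.2, zero_add]
        have hidx : pvIdx (n % 1000) = pvBV (n % 1000) := by
          rw [pvIdx_eq (n % 1000) hr0 hrlt (by omega) (by omega) (by omega), hsmall]
        rw [hm, hq, hidx, hihq]

theorem pvMain (n : Int) (hlt : n < 10 ^ 12)
    (hd : ∀ k ∈ Finset.range 12, n / 10 ^ k % 10 ≤ 1) :
    pvL n = pvO (pvBV n) :=
  pvMainAux n.toNat n le_rfl hlt hd

-- ===== VERDICT (by name: the statement is the Claim_ definition above) =====
theorem bin_oct_spec : Claim_equal_bin_oct := by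
  intro n hdom hpre
  unfold Spec_bin_oct bin_oct bin_oct_alt
  simp only [pvBinOctLoop_eq, pvOctLoop_eq, pvBinVal_eq, List.nil_append, zero_add, one_mul]
  have hlist : pvL n = pvO (pvBV n) := by
    rcases hpre with h | hd
    · rw [pvL_nil n h, pvBV_zero' n h, pvO_nil 0 le_rfl]
    · unfold Dom_bin_oct pvDomInt at hdom
      simp only [decide_eq_true_eq] at hdom
      exact pvMain n (by omega) hd
  rw [hlist]
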